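-- pv_equiv track=rewrite | github.com/edgar-hd/UN-tweets | proj1_analyse_live_tweets.py | get_bursts
-- ===== SOURCE A (Python) =====
-- def get_bursts(burst_list, masked_list, normal_list):
--     start_burst,end_burst = [],[]
--     for i, val in enumerate(masked_list[:-1]):
--         if (masked_list[i] == 0) & (masked_list[i+1] > 0):
--             start_burst.append(i+1)
--         if (len(start_burst) > len(end_burst)) & (normal_list[i] <= 20) & (masked_list[i+1] == 0):
--             end_burst.append(i+1)
--
--     for i in range(len(end_burst)):
--         burst_list.append(normal_list[start_burst[i]:end_burst[i]])
--
--     return(burst_list)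
-- ===== SOURCE B (Python) =====
-- def get_bursts(burst_list, masked_list, normal_list):
--     # Build the rising-edge list and the candidate closing-edge list by
--     # comprehensions, then pair the k-th accepted closing edge with the
--     # k-th start using a counter: a closing candidate c is accepted only
--     # when the k-th start exists and lies before c.
--     n = len(masked_list)
--     starts = [i + 1 for i in range(n - 1)
--               if masked_list[i] == 0 and masked_list[i + 1] > 0]
--     cands = [i + 1 for i in range(n - 1)
--              if masked_list[i + 1] == 0 and normal_list[i] <= 20]
--     k = 0
--     for c in cands:
--         if k < len(starts) and starts[k] < c:
--             burst_list.append(normal_list[starts[k]:c])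
--             k += 1
--     return burst_list
-- ===== Notes on version B (the rewrite author's own statement) =====
-- stated objective: alternative
-- what changed: B replaces A's single stateful scan building coupled start/end tables plus a second zip-and-slice loop by two independent edge-list comprehensions (rising edges, candidate closing edges) merged afterwards with a counter that pairs the k-th accepted closing edge with the k-th start.
import Mathlib
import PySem

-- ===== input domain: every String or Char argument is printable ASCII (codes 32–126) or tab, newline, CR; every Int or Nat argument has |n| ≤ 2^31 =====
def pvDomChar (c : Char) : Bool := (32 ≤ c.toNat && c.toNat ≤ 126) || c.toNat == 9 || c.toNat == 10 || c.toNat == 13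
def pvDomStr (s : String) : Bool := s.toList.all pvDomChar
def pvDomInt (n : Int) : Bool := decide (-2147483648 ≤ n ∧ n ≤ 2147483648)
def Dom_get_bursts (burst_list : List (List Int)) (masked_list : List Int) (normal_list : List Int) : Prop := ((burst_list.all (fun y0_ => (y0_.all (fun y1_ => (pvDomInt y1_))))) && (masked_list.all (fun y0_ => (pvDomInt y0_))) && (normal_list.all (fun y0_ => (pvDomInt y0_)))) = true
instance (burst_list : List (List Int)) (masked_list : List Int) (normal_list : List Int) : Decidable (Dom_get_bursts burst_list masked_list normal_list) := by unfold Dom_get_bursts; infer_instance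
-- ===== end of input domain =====

-- B replaces A's stateful scan building coupled start/end tables plus a zip-and-slice pass by two
-- independent edge-list comprehensions merged afterwards with a counter; an alternative of the same
-- cost. Both Pythons append to the caller's burst_list in place; the equivalence proved here is
-- about the return value.

-- ===== PORT A =====
-- one iteration of A's first loop: maybe append a start index, then maybe append an end index
def pvStepA (masked_list normal_list : List Int) (st : List Int × List Int) (i : Nat) :
    List Int × List Int :=
  let st1 := if PySem.List.pyGetD masked_list (i : Int) 0 = 0 ∧
                0 < PySem.List.pyGetD masked_list ((i : Int) + 1) 0
             then (st.1 ++ [(i : Int) + 1], st.2) else st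
  if st1.2.length < st1.1.length ∧ PySem.List.pyGetD normal_list (i : Int) 0 ≤ 20 ∧
     PySem.List.pyGetD masked_list ((i : Int) + 1) 0 = 0
  then (st1.1, st1.2 ++ [(i : Int) + 1]) else st1

def get_bursts (burst_list : List (List Int)) (masked_list : List Int) (normal_list : List Int) : List (List Int) :=
  let se := (List.range (masked_list.length - 1)).foldl (pvStepA masked_list normal_list) ([], [])
  (List.range se.2.length).foldl
    (fun acc (i : Nat) => acc ++ [PySem.List.slice normal_list
        (some (PySem.List.pyGetD se.1 (i : Int) 0)) (some (PySem.List.pyGetD se.2 (i : Int) 0))])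
    burst_list

-- ===== PORT B =====
-- the two comprehension filters: rising edges and candidate closing edges
def pvFS (masked_list : List Int) (i : Nat) : Option Int :=
  if PySem.List.pyGetD masked_list (i : Int) 0 = 0 ∧
     0 < PySem.List.pyGetD masked_list ((i : Int) + 1) 0
  then some ((i : Int) + 1) else none

def pvFC (masked_list normal_list : List Int) (i : Nat) : Option Int :=
  if PySem.List.pyGetD masked_list ((i : Int) + 1) 0 = 0 ∧
     PySem.List.pyGetD normal_list (i : Int) 0 ≤ 20
  then some ((i : Int) + 1) else none

-- the merge: accept a closing candidate c iff the k-th start exists and lies before c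
def pvMergeStep (normal_list starts : List Int) (st : Nat × List (List Int)) (c : Int) :
    Nat × List (List Int) :=
  if st.1 < starts.length ∧ starts.getD st.1 0 < c
  then (st.1 + 1,
        st.2 ++ [PySem.List.slice normal_list (some (starts.getD st.1 0)) (some c)])
  else st

def get_bursts_alt (burst_list : List (List Int)) (masked_list : List Int) (normal_list : List Int) : List (List Int) :=
  let starts := (List.range (masked_list.length - 1)).filterMap (pvFS masked_list)
  let cands := (List.range (masked_list.length - 1)).filterMap (pvFC masked_list normal_list)
  (cands.foldl (pvMergeStep normal_list starts) (0, burst_list)).2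

-- ===== PRECONDITION & SPEC =====
-- A evaluates normal_list[i] for every i < len(masked_list)-1 (bitwise '&' does not short-circuit),
-- so it raises IndexError exactly when normal_list is shorter than len(masked_list)-1.
def Pre_get_bursts (burst_list : List (List Int)) (masked_list : List Int) (normal_list : List Int) : Prop :=
  masked_list.length ≤ normal_list.length + 1
instance (burst_list : List (List Int)) (masked_list : List Int) (normal_list : List Int) : Decidable (Pre_get_bursts burst_list masked_list normal_list) := by unfold Pre_get_bursts; infer_instance

def pvWitness_get_bursts : List (List Int) × List Int × List Int := ([[1]], [0, 2, 0], [1, 2])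

def Spec_get_bursts (burst_list : List (List Int)) (masked_list : List Int) (normal_list : List Int) (out : List (List Int)) : Prop := out = get_bursts_alt burst_list masked_list normal_list
instance (burst_list : List (List Int)) (masked_list : List Int) (normal_list : List Int) (out : List (List Int)) : Decidable (Spec_get_bursts burst_list masked_list normal_list out) := by unfold Spec_get_bursts; infer_instance

-- ===== CLAIM (what is proved, stated in full; the proofs are below) =====
def Claim_equal_get_bursts : Prop := ∀ (burst_list : List (List Int)) (masked_list : List Int) (normal_list : List Int), Dom_get_bursts burst_list masked_list normal_list → Pre_get_bursts burst_list masked_list normal_list → Spec_get_bursts burst_list masked_list normal_list (get_bursts burst_list masked_list normal_list)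

-- ===== LEMMAS AND PROOFS =====

-- appending to the longer list does not change the zip
lemma pv_zip_append_left {α : Type} (S E : List α) (x : α) (h : E.length ≤ S.length) :
    (S ++ [x]).zip E = S.zip E := by
  induction E generalizing S with
  | nil => simp
  | cons e E ih =>
    cases S with
    | nil => simp at h
    | cons s S => simp_all

-- appending to the shorter list extends the zip by one pair
lemma pv_zip_append_right {α : Type} (S E : List α) (x : α) (h : E.length < S.length) :
    S.zip (E ++ [x]) = S.zip E ++ [(S[E.length], x)] := by
  induction E generalizing S with
  | nil => cases S with | nil => simp at h | cons s S => simp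
  | cons e E ih =>
    cases S with
    | nil => simp at h
    | cons s S =>
      simp only [List.length_cons] at h
      simp [ih S (by omega)]

-- every start harvested from indices ≥ i has value ≥ i + 1
lemma pv_suffix_ge (m : List Int) (i len : Nat) :
    ∀ x ∈ (List.range' i len).filterMap (pvFS m), (i : Int) + 1 ≤ x := by
  intro x hx
  obtain ⟨a, ha, hfa⟩ := List.mem_filterMap.mp hx
  have hai : i ≤ a := by rw [List.mem_range'] at ha; omega
  unfold pvFS at hfa
  split at hfa
  · cases hfa
    have : (i : Int) ≤ (a : Int) := by exact_mod_cast hai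
    omega
  · cases hfa

-- every start harvested from indices < i has value < i + 1
lemma pv_prefix_lt (m : List Int) (i : Nat) :
    ∀ x ∈ (List.range i).filterMap (pvFS m), x < (i : Int) + 1 := by
  intro x hx
  obtain ⟨a, ha, hfa⟩ := List.mem_filterMap.mp hx
  have hai : a < i := List.mem_range.mp ha
  unfold pvFS at hfa
  split at hfa
  · cases hfa
    have : (a : Int) < (i : Int) := by exact_mod_cast hai
    omega
  · cases hfa

-- the full start list splits as the prefix up to i plus a suffix of values ≥ i + 1
lemma pv_starts_split (m : List Int) (i n1 : Nat) (h : i ≤ n1) :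
    (List.range n1).filterMap (pvFS m)
      = (List.range i).filterMap (pvFS m) ++ (List.range' i (n1 - i)).filterMap (pvFS m) := by
  rw [← List.filterMap_append]
  congr 1
  have h2 := @List.range'_append 0 i (n1 - i) 1
  simp only [Nat.zero_add, Nat.one_mul] at h2
  rw [List.range_eq_range', List.range_eq_range']
  conv_lhs => rw [show n1 = i + (n1 - i) from by omega]
  exact h2.symm

-- the loop invariant tying A's stateful scan to B's merge of the two comprehensions
lemma pv_inv (m n : List Int) (b0 : List (List Int)) :
    ∀ i, i ≤ m.length - 1 →
      ((List.range i).foldl (pvStepA m n) ([], [])).1 = (List.range i).filterMap (pvFS m) ∧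
      ((List.range i).foldl (pvStepA m n) ([], [])).2.length
        ≤ ((List.range i).foldl (pvStepA m n) ([], [])).1.length ∧
      ((List.range i).filterMap (pvFC m n)).foldl
          (pvMergeStep n ((List.range (m.length - 1)).filterMap (pvFS m))) (0, b0)
        = (((List.range i).foldl (pvStepA m n) ([], [])).2.length,
           b0 ++ ((((List.range i).foldl (pvStepA m n) ([], [])).1.zip
                   ((List.range i).foldl (pvStepA m n) ([], [])).2).map
              (fun p => PySem.List.slice n (some p.1) (some p.2)))) := by
  intro i
  induction i with
  | zero => intro _; simp
  | succ i ih =>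
    intro hle
    obtain ⟨h1, h2, h3⟩ := ih (by omega)
    obtain ⟨S, E, hSE⟩ : ∃ S E, (List.range i).foldl (pvStepA m n) ([], []) = (S, E) :=
      ⟨_, _, rfl⟩
    rw [hSE] at h1 h2 h3
    simp only at h1 h2 h3
    have hsplit : (List.range (m.length - 1)).filterMap (pvFS m)
        = S ++ (List.range' i (m.length - 1 - i)).filterMap (pvFS m) := by
      rw [pv_starts_split m i (m.length - 1) (by omega), h1]
    rw [List.range_succ, List.foldl_append, List.filterMap_append, List.filterMap_append,
        List.foldl_append, hSE, h3]
    simp only [List.foldl_cons, List.foldl_nil]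
    by_cases hc1 : PySem.List.pyGetD m (i : Int) 0 = 0 ∧ 0 < PySem.List.pyGetD m ((i : Int) + 1) 0
    · -- rising edge: A appends a start; i is no closing candidate
      have hm1 : ¬ PySem.List.pyGetD m ((i : Int) + 1) 0 = 0 := by omega
      have hA : pvStepA m n (S, E) i = (S ++ [(i : Int) + 1], E) := by
        simp only [pvStepA, if_pos hc1]; simp [hm1]
      have hFS0 : pvFS m i = some ((i : Int) + 1) := by unfold pvFS; rw [if_pos hc1]
      have hFC0 : pvFC m n i = none := by
        unfold pvFC; rw [if_neg (by rintro ⟨h0, _⟩; exact hm1 h0)]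
      have hFS : (List.filterMap (pvFS m) [i]) = [(i : Int) + 1] := by
        simp [hFS0]
      have hFC : (List.filterMap (pvFC m n) [i]) = [] := by
        simp [hFC0]
      rw [hA, hFS, hFC]
      refine ⟨by rw [h1], by simp; omega, ?_⟩
      simp only [List.foldl_nil]
      rw [pv_zip_append_left S E _ h2]
    · have hFS0 : pvFS m i = none := by unfold pvFS; rw [if_neg hc1]
      have hFS : (List.filterMap (pvFS m) [i]) = [] := by simp [hFS0]
      have hA0 : pvStepA m n (S, E) i
          = if E.length < S.length ∧ PySem.List.pyGetD n (i : Int) 0 ≤ 20 ∧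
               PySem.List.pyGetD m ((i : Int) + 1) 0 = 0
            then (S, E ++ [(i : Int) + 1]) else (S, E) := by
        simp only [pvStepA, if_neg hc1]
      by_cases hcC : PySem.List.pyGetD m ((i : Int) + 1) 0 = 0 ∧
          PySem.List.pyGetD n (i : Int) 0 ≤ 20
      · -- i is a closing candidate: B's merge step fires iff A's length test holds
        have hFC0 : pvFC m n i = some ((i : Int) + 1) := by unfold pvFC; rw [if_pos hcC]
        have hFC : (List.filterMap (pvFC m n) [i]) = [(i : Int) + 1] := by
          simp [hFC0]
        rw [hFS, hFC, List.append_nil]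
        simp only [List.foldl_cons, List.foldl_nil]
        by_cases hlt : E.length < S.length
        · -- accepted: the pending start is S.getD E.length 0, and it lies before i + 1
          have hlen : E.length < ((List.range (m.length - 1)).filterMap (pvFS m)).length := by
            rw [hsplit]; simp only [List.length_append]; omega
          have hget : ((List.range (m.length - 1)).filterMap (pvFS m)).getD E.length 0
              = S.getD E.length 0 := by
            rw [hsplit, List.getD_eq_getElem _ _ (by simp only [List.length_append]; omega),
                List.getD_eq_getElem _ _ hlt]
            exact List.getElem_append_left hlt
          have hval : S.getD E.length 0 < (i : Int) + 1 := by
            apply pv_prefix_lt m i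
            rw [← h1, List.getD_eq_getElem _ _ hlt]
            exact List.getElem_mem hlt
          rw [hA0, if_pos ⟨hlt, hcC.2, hcC.1⟩]
          simp only [pvMergeStep, hget]
          rw [if_pos ⟨hlen, hval⟩]
          have hSg : S.getD E.length 0 = S[E.length] := List.getD_eq_getElem _ _ hlt
          refine ⟨h1, by simp; omega, ?_⟩
          rw [pv_zip_append_right S E _ hlt, hSg]
          simp
        · -- rejected: the pending start (if any) comes from the suffix, so it is ≥ i + 1
          have hnot : ¬ (E.length < ((List.range (m.length - 1)).filterMap (pvFS m)).length ∧
              ((List.range (m.length - 1)).filterMap (pvFS m)).getD E.length 0 < (i : Int) + 1) := by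
            rintro ⟨hl, hv⟩
            have hES : E.length = S.length := by omega
            have hl' : 0 < ((List.range' i (m.length - 1 - i)).filterMap (pvFS m)).length := by
              rw [hsplit, List.length_append] at hl; omega
            have hlT : E.length - S.length
                < ((List.range' i (m.length - 1 - i)).filterMap (pvFS m)).length := by omega
            have hel : ((List.range (m.length - 1)).filterMap (pvFS m)).getD E.length 0
                = ((List.range' i (m.length - 1 - i)).filterMap (pvFS m)).getD
                    (E.length - S.length) 0 := by
              rw [hsplit, List.getD_eq_getElem _ _ (by simp only [List.length_append]; omega),
                  List.getD_eq_getElem _ _ hlT]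
              exact List.getElem_append_right (by omega)
            have hmemT : ((List.range' i (m.length - 1 - i)).filterMap (pvFS m)).getD
                (E.length - S.length) 0 ∈ (List.range' i (m.length - 1 - i)).filterMap (pvFS m) := by
              rw [List.getD_eq_getElem _ _ hlT]; exact List.getElem_mem hlT
            have hge := pv_suffix_ge m i (m.length - 1 - i) _ hmemT
            omega
          rw [hA0, if_neg (by rintro ⟨hl, _, _⟩; exact hlt hl)]
          simp only [pvMergeStep]
          rw [if_neg hnot]
          exact ⟨h1, h2, rfl⟩
      · -- not a candidate: nothing changes on either side
        have hFC0 : pvFC m n i = none := by unfold pvFC; rw [if_neg hcC]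
        have hFC : (List.filterMap (pvFC m n) [i]) = [] := by simp [hFC0]
        rw [hFS, hFC, List.append_nil, hA0,
            if_neg (by rintro ⟨_, h20, hm0⟩; exact hcC ⟨hm0, h20⟩)]
        exact ⟨h1, h2, rfl⟩

-- A's second loop is the map over the zipped tables
lemma pv_second_loop (n : List Int) (b0 : List (List Int)) (S E : List Int)
    (h : E.length ≤ S.length) :
    (List.range E.length).foldl
      (fun acc (i : Nat) => acc ++ [PySem.List.slice n (some (PySem.List.pyGetD S (i : Int) 0))
                                       (some (PySem.List.pyGetD E (i : Int) 0))]) b0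
      = b0 ++ (S.zip E).map (fun p => PySem.List.slice n (some p.1) (some p.2)) := by
  rw [PySem.List.foldl_append_singleton_eq_map]
  congr 1
  apply List.ext_getElem
  · simp only [List.length_map, List.length_range, List.length_zip]; omega
  · intro i hi1 hi2
    have hiE : i < E.length := by simpa using hi1
    have hiS : i < S.length := by omega
    rw [List.getElem_map, List.getElem_map, List.getElem_range, List.getElem_zip,
        PySem.List.pyGetD_natCast, PySem.List.pyGetD_natCast,
        List.getD_eq_getElem _ _ hiS, List.getD_eq_getElem _ _ hiE]

-- ===== VERDICT (by name: the statement is the Claim_ definition above) =====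
theorem get_bursts_spec : Claim_equal_get_bursts := by
  intro b m n _ _
  show get_bursts b m n = get_bursts_alt b m n
  unfold get_bursts get_bursts_alt
  obtain ⟨h1, h2, h3⟩ := pv_inv m n b (m.length - 1) (le_refl _)
  rw [pv_second_loop n b _ _ h2]
  exact (congrArg Prod.snd h3).symm
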